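-- pv_equiv track=rewrite | github.com/riyuna/problem-solving | boj/17524.py | solve
-- ===== SOURCE A (Python) =====
-- from functools import cmp_to_key
--
-- def solve(L, k):
--     if len(L)==0:return 0
--     L.sort()
--     t=L[0][0]
--     def time_cmp(a, b):
--         return 1 if (a[0]-t)*(a[1])<=(b[0]-t)*(b[1]) else -1
--     L=sorted(L, key=cmp_to_key(time_cmp))
--     mi=(L[0][0]-t)*L[0][1]+30
--     if k==1:return mi
--     val=0
--     for i in range(len(L)-1):
--         last=L.pop(-1)
--         val=max(val,(last[0]-t)*last[1]+30)
--         mi=min(mi, solve(L[:], k-1)+val)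
--     return mi
-- ===== SOURCE B (Python) =====
-- def solve(L, k):
--     # Memoized re-implementation: state = (lex-sorted tuple of L, k); the cmp_to_key
--     # comparator in A is exactly a stable descending sort by (x - t) * y.
--     # Returns A's value without mutating L (A sorts L in place).
--     memo = {}
--
--     def go(S, kk):
--         key = (S, kk)
--         if key in memo:
--             return memo[key]
--         if len(S) == 0:
--             r = 0
--         else:
--             t = S[0][0]
--             M = sorted(S, key=lambda p: (p[0] - t) * p[1], reverse=True)
--             r = (M[0][0] - t) * M[0][1] + 30
--             if kk != 1:
--                 val = 0
--                 for j in range(len(M) - 1, 0, -1):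
--                     val = max(val, (M[j][0] - t) * M[j][1] + 30)
--                     r = min(r, go(tuple(sorted(M[:j])), kk - 1) + val)
--         memo[key] = r
--         return r
--
--     return go(tuple(sorted(L)), k)
-- ===== Notes on version B (the rewrite author's own statement) =====
-- stated objective: faster
-- what changed: B memoizes the recursion on the canonical state (lex-sorted tuple of the remaining items, k), so each distinct sub-multiset/k pair is solved once instead of being re-solved exponentially often; the cmp_to_key sort is expressed as the equivalent stable descending sort by (x-t)*y. A sorts its argument in place; B does not mutate it (return values agree).
import Mathlib
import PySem

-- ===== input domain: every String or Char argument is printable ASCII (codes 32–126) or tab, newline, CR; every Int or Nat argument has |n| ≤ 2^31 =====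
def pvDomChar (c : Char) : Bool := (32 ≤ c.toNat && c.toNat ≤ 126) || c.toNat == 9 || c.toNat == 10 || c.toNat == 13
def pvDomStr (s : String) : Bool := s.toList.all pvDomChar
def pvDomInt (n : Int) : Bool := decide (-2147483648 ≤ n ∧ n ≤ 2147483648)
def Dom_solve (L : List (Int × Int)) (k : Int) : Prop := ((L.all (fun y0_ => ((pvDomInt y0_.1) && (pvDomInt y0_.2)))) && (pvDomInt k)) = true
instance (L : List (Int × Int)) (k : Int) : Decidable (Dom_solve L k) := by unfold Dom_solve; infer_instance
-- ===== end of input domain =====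

-- B memoizes the recursion on the canonical state (lex-sorted remaining list, k); faster.
-- A sorts its argument list in place; the equivalence proved here is about the return value only.

-- lexicographic sort of pairs (Python's list.sort()/sorted() on tuples); shared helper
def lexSort (X : List (Int × Int)) : List (Int × Int) :=
  PySem.List.sorted2 X (fun p => p.1) (fun p => p.2) false

-- ===== PORT A =====
-- the 'for i in range(len(L)-1)' loop of A: counter counts remaining iterations,
-- M is the current (popped-from) list; f is the recursive call solve(·, k-1)
def loopA (f : List (Int × Int) → Int → Int) (t k : Int) :
    Nat → List (Int × Int) → Int → Int → Int
  | 0, _, _, mi => mi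
  | c + 1, M, val, mi =>
      let last := M.getLastD (0, 0)            -- last = L.pop(-1)
      let M' := M.dropLast
      let val' := max val ((last.1 - t) * last.2 + 30)
      let mi' := min mi (f M' (k - 1) + val')   -- mi = min(mi, solve(L[:], k-1) + val)
      loopA f t k c M' val' mi'

-- A with a fuel parameter (= length bound) only to make the recursion structural;
-- the cmp_to_key(time_cmp) sort is exactly a stable descending sort by (x - t) * y
-- (a < b under the comparator iff key a > key b; ties are stable), ported as
-- PySem.List.sorted … true which implements Python's stable reverse=True rule.
def solveF : Nat → List (Int × Int) → Int → Int
  | 0, _, _ => 0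
  | fuel + 1, L, k =>
      if L.length == 0 then 0
      else
        let Ls := lexSort L                                    -- L.sort()
        let t := (Ls.headD (0, 0)).1                           -- t = L[0][0]
        let M := PySem.List.sorted Ls (fun p => (p.1 - t) * p.2) true
        let p0 := M.headD (0, 0)
        let mi := (p0.1 - t) * p0.2 + 30                       -- mi = (L[0][0]-t)*L[0][1]+30
        if k == 1 then mi
        else loopA (fun X kk => solveF fuel X kk) t k (M.length - 1) M 0 mi

def solve (L : List (Int × Int)) (k : Int) : Int := solveF L.length L k

-- ===== PORT B =====
-- the memo dictionary: key = (lex-sorted tuple, k)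
def loopB (g : List (Int × Int) → Int → PySem.Dict (List (Int × Int) × Int) Int →
             Int × PySem.Dict (List (Int × Int) × Int) Int)
    (t kk : Int) (M : List (Int × Int)) :
    Nat → Int → Int → PySem.Dict (List (Int × Int) × Int) Int →
      Int × PySem.Dict (List (Int × Int) × Int) Int
  | 0, _, r, memo => (r, memo)
  | j + 1, val, r, memo =>                                     -- current index is j+1
      let p := (PySem.List.pyGet? M ((j + 1 : Nat) : Int)).getD (0, 0)   -- M[j]
      let val' := max val ((p.1 - t) * p.2 + 30)
      let res := g (lexSort (M.take (j + 1))) (kk - 1) memo    -- go(tuple(sorted(M[:j])), kk-1)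
      let r' := min r (res.1 + val')
      loopB g t kk M j val' r' res.2

-- go(S, kk) threading the memo dictionary; fuel (= length bound) for structural recursion
def goF : Nat → List (Int × Int) → Int →
    PySem.Dict (List (Int × Int) × Int) Int →
      Int × PySem.Dict (List (Int × Int) × Int) Int
  | 0, _, _, memo => (0, memo)
  | fuel + 1, S, kk, memo =>
      match memo.get? (S, kk) with
      | some v => (v, memo)                                    -- if key_ in memo
      | none =>
        if S.length == 0 then (0, memo.insert (S, kk) 0)
        else
          let t := (S.headD (0, 0)).1
          let M := PySem.List.sorted S (fun p => (p.1 - t) * p.2) true   -- sorted(…, reverse=True)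
          let p0 := M.headD (0, 0)
          let r0 := (p0.1 - t) * p0.2 + 30
          if kk == 1 then (r0, memo.insert (S, kk) r0)
          else
            let res := loopB (fun X j m => goF fuel X j m) t kk M (M.length - 1) 0 r0 memo
            (res.1, res.2.insert (S, kk) res.1)

def solve_alt (L : List (Int × Int)) (k : Int) : Int :=
  (goF (L.length + 1) (lexSort L) k PySem.Dict.empty).1        -- go(tuple(sorted(L)), k)

-- ===== PRECONDITION & SPEC =====
def Spec_solve (L : List (Int × Int)) (k : Int) (out : Int) : Prop := out = solve_alt L k
instance (L : List (Int × Int)) (k : Int) (out : Int) : Decidable (Spec_solve L k out) := by unfold Spec_solve; infer_instance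

-- ===== CLAIM (what is proved, stated in full; the proofs are below) =====
def Claim_equal_solve : Prop := ∀ (L : List (Int × Int)) (k : Int), Dom_solve L k → Spec_solve L k (solve L k)

-- ===== LEMMAS AND PROOFS =====

-- pure (memo-free) reference recursion: what go computes for a given key
def loopP (g : List (Int × Int) → Int → Int) (t kk : Int) (M : List (Int × Int)) :
    Nat → Int → Int → Int
  | 0, _, r => r
  | j + 1, val, r =>
      let p := M.getD (j + 1) (0, 0)
      let val' := max val ((p.1 - t) * p.2 + 30)
      let r' := min r (g (lexSort (M.take (j + 1))) (kk - 1) + val')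
      loopP g t kk M j val' r'

def specGo : Nat → List (Int × Int) → Int → Int
  | 0, _, _ => 0
  | fuel + 1, S, kk =>
      if S.length == 0 then 0
      else
        let t := (S.headD (0, 0)).1
        let M := PySem.List.sorted S (fun p => (p.1 - t) * p.2) true
        let p0 := M.headD (0, 0)
        let r0 := (p0.1 - t) * p0.2 + 30
        if kk == 1 then r0
        else loopP (fun X j => specGo fuel X j) t kk M (M.length - 1) 0 r0

-- memo invariant: every cached value is the canonical one
def GoodMemo (memo : PySem.Dict (List (Int × Int) × Int) Int) : Prop :=
  ∀ S kk v, memo.get? (S, kk) = some v → v = specGo (S.length + 1) S kk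

theorem length_lexSort (X : List (Int × Int)) : (lexSort X).length = X.length := by
  exact (PySem.List.sorted2_perm X _ _ _).length_eq

theorem lexSort_nil : lexSort ([] : List (Int × Int)) = [] := by
  have h := length_lexSort ([] : List (Int × Int))
  exact List.eq_nil_of_length_eq_zero h

theorem specGo_nil (f : Nat) (kk : Int) : specGo f [] kk = 0 := by
  cases f <;> simp [specGo]

theorem loopP_congr (g₁ g₂ : List (Int × Int) → Int → Int) (t kk : Int)
    (M : List (Int × Int)) (c : Nat)
    (h : ∀ j, 1 ≤ j → j ≤ c → g₁ (lexSort (M.take j)) (kk - 1) = g₂ (lexSort (M.take j)) (kk - 1)) :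
    ∀ val r, loopP g₁ t kk M c val r = loopP g₂ t kk M c val r := by
  induction c with
  | zero => intro val r; rfl
  | succ c ih =>
      intro val r
      simp only [loopP]
      rw [h (c + 1) (by omega) (by omega)]
      exact ih (fun j h1 h2 => h j h1 (by omega)) _ _

theorem specGo_fuel : ∀ (f₁ f₂ : Nat) (S : List (Int × Int)) (kk : Int),
    S.length ≤ f₁ → S.length ≤ f₂ → specGo f₁ S kk = specGo f₂ S kk := by
  intro f₁
  induction f₁ with
  | zero =>
      intro f₂ S kk h1 _
      have : S = [] := List.eq_nil_of_length_eq_zero (by omega)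
      subst this; rw [specGo_nil, specGo_nil]
  | succ f ih =>
      intro f₂ S kk h1 h2
      cases f₂ with
      | zero =>
          have : S = [] := List.eq_nil_of_length_eq_zero (by omega)
          subst this; rw [specGo_nil, specGo_nil]
      | succ g =>
          by_cases hS : S.length = 0
          · simp [specGo, hS]
          · simp only [specGo, beq_iff_eq, hS, if_false]
            by_cases hk : kk = 1
            · simp [hk]
            · simp only [hk, if_false]
              apply loopP_congr
              intro j hj1 hj2
              have hM : (PySem.List.sorted S (fun p => (p.1 - (S.headD (0,0)).1) * p.2) true).length = S.length :=
                PySem.List.length_sorted _ _ _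
              have hjlen : (lexSort ((PySem.List.sorted S (fun p => (p.1 - (S.headD (0,0)).1) * p.2) true).take j)).length = j := by
                rw [length_lexSort, List.length_take]
                omega
              exact ih g _ _ (by omega) (by omega)

theorem loopA_eq (f : List (Int × Int) → Int → Int) (g : List (Int × Int) → Int → Int)
    (t kk : Int) (M : List (Int × Int)) :
    ∀ (c : Nat), c < M.length →
      (∀ j, 1 ≤ j → j ≤ c → f (M.take j) (kk - 1) = g (lexSort (M.take j)) (kk - 1)) →
      ∀ val r, loopA f t kk c (M.take (c + 1)) val r = loopP g t kk M c val r := by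
  intro c
  induction c with
  | zero => intro _ _ val r; rfl
  | succ c ih =>
      intro hc h val r
      simp only [loopA, loopP]
      have hlen : (M.take (c + 2)).length = c + 2 := by
        rw [List.length_take]; omega
      have hlast : (M.take (c + 2)).getLastD (0, 0) = M.getD (c + 1) (0, 0) := by
        rw [List.getLastD_eq_getLast?, List.getLast?_eq_getElem?, hlen]
        have h21 : c + 2 - 1 = c + 1 := rfl
        rw [h21, List.getElem?_take_of_lt (by omega), List.getD_eq_getElem?_getD]
      have hdrop : (M.take (c + 2)).dropLast = M.take (c + 1) := by
        rw [List.dropLast_eq_take, hlen]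
        simp only [List.take_take]
        congr 1; omega
      rw [hlast, hdrop, h (c + 1) (by omega) (by omega)]
      exact ih (by omega) (fun j h1 h2 => h j h1 (by omega)) _ _

theorem solveF_eq_specGo : ∀ (fuel : Nat) (X : List (Int × Int)) (kk : Int),
    X.length ≤ fuel → solveF fuel X kk = specGo fuel (lexSort X) kk := by
  intro fuel
  induction fuel with
  | zero =>
      intro X kk h
      have : X = [] := List.eq_nil_of_length_eq_zero (by omega)
      subst this; rw [lexSort_nil, specGo_nil]; rfl
  | succ fuel ih =>
      intro X kk h
      have hlen : (lexSort X).length = X.length := length_lexSort X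
      by_cases hX : X.length = 0
      · have : X = [] := List.eq_nil_of_length_eq_zero hX
        subst this; rw [lexSort_nil, specGo_nil]
        rfl
      · simp only [solveF, specGo, beq_iff_eq, hX, if_false, hlen]
        by_cases hk : kk = 1
        · simp [hk]
        · simp only [hk, if_false]
          set S := lexSort X with hSdef
          set t := (S.headD (0, 0)).1 with htdef
          set M := PySem.List.sorted S (fun p => (p.1 - t) * p.2) true with hMdef
          have hMlen : M.length = X.length := by
            rw [hMdef, PySem.List.length_sorted, hSdef, hlen]
          have hMpos : 0 < M.length := by omega
          have htake : M.take ((M.length - 1) + 1) = M := by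
            rw [show (M.length - 1) + 1 = M.length by omega, List.take_length]
          have hrec : ∀ j, 1 ≤ j → j ≤ M.length - 1 →
              solveF fuel (M.take j) (kk - 1) = specGo fuel (lexSort (M.take j)) (kk - 1) := by
            intro j hj1 hj2
            apply ih
            rw [List.length_take]; omega
          have hA := loopA_eq (fun X kk => solveF fuel X kk) (fun X j => specGo fuel X j)
            t kk M (M.length - 1) (by omega) hrec 0
            (((M.headD (0,0)).1 - t) * (M.headD (0,0)).2 + 30)
          rw [htake] at hA
          exact hA

theorem goodMemo_empty : GoodMemo PySem.Dict.empty := by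
  intro S kk v h
  rw [PySem.Dict.get?_empty] at h
  exact absurd h (by simp)

theorem goodMemo_insert (memo : PySem.Dict (List (Int × Int) × Int) Int)
    (S : List (Int × Int)) (kk : Int) (r : Int)
    (hg : GoodMemo memo) (hr : r = specGo (S.length + 1) S kk) :
    GoodMemo (memo.insert (S, kk) r) := by
  intro S' kk' v h
  rw [PySem.Dict.get?_insert] at h
  by_cases he : (S', kk') = (S, kk)
  · rw [if_pos he] at h
    have h1 : S' = S := congrArg Prod.fst he
    have h2 : kk' = kk := congrArg Prod.snd he
    subst h1; subst h2
    rw [← Option.some.inj h]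
    exact hr
  · rw [if_neg he] at h
    exact hg S' kk' v h

theorem goF_eq_specGo : ∀ (fuel : Nat) (S : List (Int × Int)) (kk : Int)
    (memo : PySem.Dict (List (Int × Int) × Int) Int),
    GoodMemo memo → S.length ≤ fuel →
    (goF fuel S kk memo).1 = specGo (S.length + 1) S kk ∧ GoodMemo (goF fuel S kk memo).2 := by
  intro fuel
  induction fuel with
  | zero =>
      intro S kk memo hg h
      have : S = [] := List.eq_nil_of_length_eq_zero (by omega)
      subst this
      exact ⟨by rw [specGo_nil]; rfl, hg⟩
  | succ fuel ih =>
      intro S kk memo hg h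
      simp only [goF]
      cases hget : memo.get? (S, kk) with
      | some v => exact ⟨hg S kk v hget, hg⟩
      | none =>
        by_cases hS : S.length = 0
        · have hnil : S = [] := List.eq_nil_of_length_eq_zero hS
          subst hnil
          simp only [List.length_nil, beq_self_eq_true, if_true]
          exact ⟨by rw [specGo_nil], goodMemo_insert _ _ _ _ hg (by rw [specGo_nil])⟩
        · simp only [beq_iff_eq, hS, if_false]
          set t := (S.headD (0, 0)).1 with htdef
          set M := PySem.List.sorted S (fun p => (p.1 - t) * p.2) true with hMdef
          have hMlen : M.length = S.length := PySem.List.length_sorted _ _ _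
          by_cases hk : kk = 1
          · subst hk
            have hval : ((M.headD (0, 0)).1 - t) * (M.headD (0, 0)).2 + 30 = specGo (S.length + 1) S 1 := by
              conv_rhs => rw [specGo]
              simp only [beq_iff_eq, hS, if_false, if_true, ← htdef, ← hMdef]
            simp only [if_true]
            exact ⟨hval, goodMemo_insert _ _ _ _ hg hval⟩
          · simp only [hk, if_false]
            -- the threaded loop equals the pure loop
            have hloop : ∀ (c : Nat), c < S.length →
                ∀ val r memo', GoodMemo memo' →
                (loopB (fun X j m => goF fuel X j m) t kk M c val r memo').1
                    = loopP (fun X j => specGo S.length X j) t kk M c val r ∧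
                  GoodMemo (loopB (fun X j m => goF fuel X j m) t kk M c val r memo').2 := by
              intro c
              induction c with
              | zero => intro _ val r memo' hg'; exact ⟨rfl, hg'⟩
              | succ c ihc =>
                  intro hc val r memo' hg'
                  simp only [loopB, loopP]
                  have hp : (PySem.List.pyGet? M ((c + 1 : Nat) : Int)).getD (0, 0)
                      = M.getD (c + 1) (0, 0) := by
                    rw [PySem.List.pyGet?_natCast, List.getD_eq_getElem?_getD]
                  have hjlen : (lexSort (M.take (c + 1))).length = c + 1 := by
                    rw [length_lexSort, List.length_take]; omega
                  have hrec := ih (lexSort (M.take (c + 1))) (kk - 1) memo' hg' (by omega)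
                  have hv : (goF fuel (lexSort (M.take (c + 1))) (kk - 1) memo').1
                      = specGo S.length (lexSort (M.take (c + 1))) (kk - 1) := by
                    rw [hrec.1, hjlen]
                    exact specGo_fuel _ _ _ _ (by omega) (by omega)
                  rw [hp, hv]
                  exact ihc (by omega) _ _ _ hrec.2
            have hc : S.length - 1 < S.length := by omega
            have hmain := hloop (S.length - 1) hc 0 (((M.headD (0,0)).1 - t) * (M.headD (0,0)).2 + 30) memo hg
            have hspec : specGo (S.length + 1) S kk
                = loopP (fun X j => specGo S.length X j) t kk M (S.length - 1) 0
                    (((M.headD (0,0)).1 - t) * (M.headD (0,0)).2 + 30) := by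
              conv_lhs => rw [specGo]
              simp only [beq_iff_eq, hS, if_false, hk, ← htdef, ← hMdef, hMlen]
            rw [hMlen]
            refine ⟨by rw [hmain.1, hspec], goodMemo_insert _ _ _ _ hmain.2 ?_⟩
            rw [hmain.1, hspec]

-- ===== VERDICT (by name: the statement is the Claim_ definition above) =====
theorem solve_spec : Claim_equal_solve := by
  intro L k _
  unfold Spec_solve solve solve_alt
  have h1 : solveF L.length L k = specGo L.length (lexSort L) k :=
    solveF_eq_specGo L.length L k (le_refl _)
  have h2 := goF_eq_specGo (L.length + 1) (lexSort L) k PySem.Dict.empty goodMemo_empty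
    (by rw [length_lexSort]; omega)
  rw [h1, h2.1, length_lexSort]
  exact specGo_fuel _ _ _ _ (by rw [length_lexSort]) (by rw [length_lexSort]; omega)
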